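-- pv_equiv track=rewrite | github.com/rayhanp1402/Algeo02-21112 | src/eigen.py | CreateLambdaMatrix
-- ===== SOURCE A (Python) =====
-- def CreateLambdaMatrix(Matrix):
--     Matrix1 = [[0 for j in range(len(Matrix))] for i in range(len(Matrix))]
--
--     for i in range(len(Matrix)):
--         for j in range(len(Matrix)):
--             if(i == j):
--                 Matrix1[i][j] = [-Matrix[i][j], 1]
--             else:
--                 Matrix1[i][j] = [-Matrix[i][j]]
--
--     return Matrix1
-- ===== SOURCE B (Python) =====
-- def CreateLambdaMatrix(Matrix):
--     n = len(Matrix)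
--
--     def build(rows, i):
--         # recursion over the rows; each row is assembled by slicing around
--         # the diagonal column i: cells before, the diagonal cell, cells after
--         if not rows:
--             return []
--         row = rows[0]
--         new_row = ([[-x] for x in row[:i]]
--                    + [[-row[i], 1]]
--                    + [[-x] for x in row[i + 1:n]])
--         return [new_row] + build(rows[1:], i + 1)
--
--     return build(Matrix, 0)
-- ===== Notes on version B (the rewrite author's own statement) =====
-- stated objective: alternative
-- what changed: Replaces A's index-driven nested loop with an i==j branch by a recursion over the list of rows carrying the diagonal position, assembling each row by slicing it into the part before the diagonal, the diagonal cell [-row[i],1], and the part after, with no per-cell conditional.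
import Mathlib
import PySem

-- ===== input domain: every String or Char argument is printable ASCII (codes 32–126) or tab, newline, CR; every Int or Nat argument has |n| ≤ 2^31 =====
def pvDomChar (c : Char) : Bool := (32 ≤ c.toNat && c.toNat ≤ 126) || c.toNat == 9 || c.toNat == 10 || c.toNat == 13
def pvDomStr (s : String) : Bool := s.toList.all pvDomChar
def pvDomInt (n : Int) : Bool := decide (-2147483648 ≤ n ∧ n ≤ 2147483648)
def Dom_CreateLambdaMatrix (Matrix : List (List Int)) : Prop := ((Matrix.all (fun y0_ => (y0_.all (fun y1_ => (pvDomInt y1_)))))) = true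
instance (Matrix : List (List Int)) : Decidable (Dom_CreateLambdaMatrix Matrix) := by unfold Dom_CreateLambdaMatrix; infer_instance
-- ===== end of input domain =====

-- B replaces A's branchy nested index loop by a recursion over the rows that slices each
-- row around the moving diagonal position; alternative decomposition, same O(n^2) cost.


-- ===== PORT A =====
-- A builds an n×n placeholder matrix, then overwrites every cell in a nested i,j loop
-- ([-M[i][j], 1] on the diagonal, [-M[i][j]] elsewhere).  The int placeholder 0 of the
-- Python init cannot live in List (List Int); we use [] — every cell is overwritten
-- inside Pre_, so the placeholder never appears in the result.  Cell reads use getD;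
-- Python raises IndexError on too-short rows, which Pre_ excludes.
def CreateLambdaMatrix (Matrix : List (List Int)) : List (List (List Int)) :=
  let n := Matrix.length
  let init : List (List (List Int)) :=
    (List.range n).map (fun _ => (List.range n).map (fun _ => ([] : List Int)))
  (List.range n).foldl (fun M1 i =>
    (List.range n).foldl (fun M1 j =>
      M1.set i ((M1.getD i []).set j
        (if i = j then [-((Matrix.getD i []).getD j 0), 1]
         else [-((Matrix.getD i []).getD j 0)]))) M1) init

-- ===== PORT B =====
-- B: recursion over the rows carrying the diagonal position i; each row is sliced
-- around the diagonal.  row[:i] → take i and row[i+1:n] → (take n).drop (i+1) are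
-- exact for these nonnegative in-range bounds; row[i] (raises IndexError when the
-- row is too short, excluded by Pre_) is read with getD.
def pvAltBuild (n : Nat) : List (List Int) → Nat → List (List (List Int))
  | [], _ => []
  | row :: rest, i =>
    ((row.take i).map (fun x => [-x])
      ++ [-(row.getD i 0), 1] :: ((row.take n).drop (i + 1)).map (fun x => [-x]))
      :: pvAltBuild n rest (i + 1)

def CreateLambdaMatrix_alt (Matrix : List (List Int)) : List (List (List Int)) :=
  pvAltBuild Matrix.length Matrix 0

-- ===== PRECONDITION & SPEC =====
-- Pre_ excludes matrices with a row shorter than the number of rows, on which the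
-- Python A (and B) raise IndexError.
def Pre_CreateLambdaMatrix (Matrix : List (List Int)) : Prop :=
  ∀ row ∈ Matrix, Matrix.length ≤ row.length
instance (Matrix : List (List Int)) : Decidable (Pre_CreateLambdaMatrix Matrix) := by
  unfold Pre_CreateLambdaMatrix; infer_instance
def pvWitness_CreateLambdaMatrix : List (List Int) := [[1, 2], [3, 4]]
def Spec_CreateLambdaMatrix (Matrix : List (List Int)) (out : List (List (List Int))) : Prop := out = CreateLambdaMatrix_alt Matrix
instance (Matrix : List (List Int)) (out : List (List (List Int))) : Decidable (Spec_CreateLambdaMatrix Matrix out) := by unfold Spec_CreateLambdaMatrix; infer_instance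

-- ===== CLAIM (what is proved, stated in full; the proofs are below) =====
def Claim_equal_CreateLambdaMatrix : Prop := ∀ (Matrix : List (List Int)), Dom_CreateLambdaMatrix Matrix → Pre_CreateLambdaMatrix Matrix → Spec_CreateLambdaMatrix Matrix (CreateLambdaMatrix Matrix)

-- ===== LEMMAS AND PROOFS =====

-- Generic "diagonal writer" closed form for A's folds.
theorem foldl_set_diag {α : Type} (h : α → Nat → α) (d : α) :
    ∀ (m : Nat) (M0 : List α), m ≤ M0.length →
      (List.range m).foldl (fun M k => M.set k (h (M.getD k d) k)) M0
        = ((List.range m).map (fun k => h (M0.getD k d) k)) ++ M0.drop m := by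
  intro m
  induction m with
  | zero => intro M0 _; simp
  | succ m ih =>
    intro M0 hm
    have hm' : m ≤ M0.length := Nat.le_of_succ_le hm
    rw [List.range_succ, List.foldl_append, ih M0 hm', List.map_append, List.foldl_cons,
      List.foldl_nil]
    have hlen : (((List.range m).map (fun k => h (M0.getD k d) k))).length = m := by simp
    have hget : (((List.range m).map (fun k => h (M0.getD k d) k)) ++ M0.drop m).getD m d
        = M0.getD m d := by
      rw [List.getD_eq_getElem?_getD, List.getElem?_append_right (by omega)]
      rw [hlen, Nat.sub_self]
      have hdrop : (M0.drop m)[0]? = M0[m]? := by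
        rw [List.getElem?_drop]; norm_num
      rw [hdrop, List.getD_eq_getElem?_getD]
    rw [hget]
    have hset : (((List.range m).map (fun k => h (M0.getD k d) k)) ++ M0.drop m).set m
          (h (M0.getD m d) m)
        = ((List.range m).map (fun k => h (M0.getD k d) k)) ++ (M0.drop m).set 0
          (h (M0.getD m d) m) := by
      rw [List.set_append_right _ _ (by omega), hlen, Nat.sub_self]
    rw [hset]
    have hdropcons : M0.drop m = M0.getD m d :: M0.drop (m + 1) := by
      calc M0.drop m = M0.drop m := rfl
        _ = M0.getD m d :: M0.drop (m + 1) := by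
          rw [List.drop_eq_getElem_cons (by omega)]
          congr 1
          rw [List.getD_eq_getElem?_getD, List.getElem?_eq_getElem (by omega)]
          simp
    rw [hdropcons]
    simp

-- Both ports equal this common closed form.
def pvClosed (Matrix : List (List Int)) : List (List (List Int)) :=
  let n := Matrix.length
  (List.range n).map (fun i => (List.range n).map (fun j =>
    if i = j then [-((Matrix.getD i []).getD j 0), 1] else [-((Matrix.getD i []).getD j 0)]))

theorem portA_closed (Matrix : List (List Int)) :
    CreateLambdaMatrix Matrix = pvClosed Matrix := by
  unfold CreateLambdaMatrix pvClosed
  set n := Matrix.length with hn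
  have inner : ∀ (i : Nat) (r : List (List Int)), r.length = n →
      (List.range n).foldl (fun r j => r.set j
          (if i = j then [-((Matrix.getD i []).getD j 0), 1]
           else [-((Matrix.getD i []).getD j 0)])) r
        = (List.range n).map (fun j =>
          (if i = j then [-((Matrix.getD i []).getD j 0), 1]
           else [-((Matrix.getD i []).getD j 0)])) := by
    intro i r hr
    have h0 := foldl_set_diag (α := List Int)
      (fun _ j => (if i = j then [-((Matrix.getD i []).getD j 0), 1]
           else [-((Matrix.getD i []).getD j 0)])) [] n r (by omega)
    rw [h0, List.drop_eq_nil_of_le (by omega), List.append_nil]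
  have hstep : (fun (M1 : List (List (List Int))) (i : Nat) =>
      (List.range n).foldl (fun M1 j =>
        M1.set i ((M1.getD i []).set j
          (if i = j then [-((Matrix.getD i []).getD j 0), 1]
           else [-((Matrix.getD i []).getD j 0)]))) M1)
      = (fun M1 i => M1.set i
          ((List.range n).foldl (fun r j => r.set j
            (if i = j then [-((Matrix.getD i []).getD j 0), 1]
             else [-((Matrix.getD i []).getD j 0)])) (M1.getD i []))) := by
    funext M1 i
    have key : ∀ (js : List Nat) (M : List (List (List Int))),
        js.foldl (fun M1 j =>
          M1.set i ((M1.getD i []).set j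
            (if i = j then [-((Matrix.getD i []).getD j 0), 1]
             else [-((Matrix.getD i []).getD j 0)]))) M
        = M.set i (js.foldl (fun r j => r.set j
            (if i = j then [-((Matrix.getD i []).getD j 0), 1]
             else [-((Matrix.getD i []).getD j 0)])) (M.getD i [])) := by
      intro js
      induction js with
      | nil =>
        intro M
        by_cases hi : i < M.length
        · have hgd : M.getD i ([] : List (List Int)) = M[i] := by
            rw [List.getD_eq_getElem?_getD, List.getElem?_eq_getElem hi]; rfl
          rw [List.foldl_nil, List.foldl_nil, hgd, List.set_getElem_self]
        · rw [List.foldl_nil, List.foldl_nil, List.set_eq_of_length_le (by omega)]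
      | cons j js ihj =>
        intro M
        simp only [List.foldl_cons]
        rw [ihj]
        by_cases hi : i < M.length
        · have h1 : ∀ x : List (List Int), (M.set i x).getD i [] = x := by
            intro x
            rw [List.getD_eq_getElem?_getD, List.getElem?_set_self (by simpa using hi)]
            rfl
          rw [h1, List.set_set]
        · have h2 : ∀ x : List (List Int), M.set i x = M :=
            fun x => List.set_eq_of_length_le (by omega)
          simp only [h2]
    exact key (List.range n) M1
  show (List.range n).foldl _ _ = _
  rw [hstep]
  have := foldl_set_diag (α := List (List Int))
    (fun r i => (List.range n).foldl (fun r j => r.set j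
      (if i = j then [-((Matrix.getD i []).getD j 0), 1]
       else [-((Matrix.getD i []).getD j 0)])) r) [] n
    ((List.range n).map (fun _ => (List.range n).map (fun _ => ([] : List Int))))
    (by simp)
  rw [this]
  have hdrop : (((List.range n).map
      (fun _ => (List.range n).map (fun _ => ([] : List Int))))).drop n = [] := by
    apply List.drop_eq_nil_of_le; simp
  rw [hdrop, List.append_nil]
  apply List.map_congr_left
  intro i hi
  have hi' : i < n := List.mem_range.mp hi
  have hrow : (((List.range n).map
      (fun _ => (List.range n).map (fun _ => ([] : List Int))))).getD i []
      = (List.range n).map (fun _ => ([] : List Int)) := by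
    rw [List.getD_eq_getElem?_getD, List.getElem?_map, List.getElem?_eq_getElem (by simpa)]
    simp
  rw [hrow]
  exact inner i _ (by simp)

-- One B-row equals the closed-form row.
theorem altRow_closed (row : List Int) (i n : Nat) (hin : i < n) (hn : n ≤ row.length) :
    (row.take i).map (fun x => [-x])
      ++ [-(row.getD i 0), 1] :: ((row.take n).drop (i + 1)).map (fun x => [-x])
    = (List.range n).map (fun j =>
        if i = j then [-(row.getD j 0), 1] else [-(row.getD j 0)]) := by
  have hgd : ∀ (k : Nat) (hk : k < n), row.getD k 0 = row[k]'(by omega) := by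
    intro k hk
    rw [List.getD_eq_getElem?_getD, List.getElem?_eq_getElem (by omega)]; rfl
  apply List.ext_getElem?
  intro j
  have hR : ((List.range n).map (fun j =>
      if i = j then [-(row.getD j 0), 1] else [-(row.getD j 0)]))[j]?
      = if j < n then some (if i = j then [-(row.getD j 0), 1] else [-(row.getD j 0)])
        else none := by
    by_cases hjn : j < n
    · rw [List.getElem?_map, List.getElem?_range hjn]; simp [hjn]
    · rw [List.getElem?_map, List.getElem?_eq_none (by simpa using hjn)]
      simp [hjn]
  rw [hR]
  have hlenL : ((row.take i).map (fun x : Int => [-x])).length = i := by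
    simp; omega
  rcases lt_trichotomy j i with h | h | h
  · rw [List.getElem?_append_left (by omega), if_pos (by omega)]
    rw [List.getElem?_map, List.getElem?_take, if_pos h,
      List.getElem?_eq_getElem (by omega)]
    simp only [Option.map_some, if_neg (by omega : ¬ i = j)]
    rw [hgd j (by omega)]
  · subst h
    rw [List.getElem?_append_right (by omega), hlenL, Nat.sub_self, if_pos hin]
    simp
  · rw [List.getElem?_append_right (by omega), hlenL]
    have hidx : j - i = (j - i - 1) + 1 := by omega
    rw [hidx, List.getElem?_cons_succ, List.getElem?_map]
    by_cases hjn : j < n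
    · rw [List.getElem?_drop, List.getElem?_take,
        if_pos (by omega : i + 1 + (j - i - 1) < n),
        List.getElem?_eq_getElem (by omega)]
      have hj' : i + 1 + (j - i - 1) = j := by omega
      simp only [hj', if_pos hjn, Option.map_some]
      rw [hgd j hjn]
      simp [if_neg (by omega : ¬ i = j)]
    · rw [List.getElem?_drop, List.getElem?_take,
        if_neg (by omega : ¬ i + 1 + (j - i - 1) < n)]
      simp [hjn]

-- B's recursion over the row suffix Matrix.drop i produces rows i..n-1 of the closed form.
theorem altBuild_closed (Matrix : List (List Int))
    (hpre : ∀ row ∈ Matrix, Matrix.length ≤ row.length) :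
    ∀ (rows : List (List Int)) (i : Nat), Matrix.drop i = rows →
      i + rows.length = Matrix.length →
      pvAltBuild Matrix.length rows i
        = ((List.range Matrix.length).drop i).map (fun i => (List.range Matrix.length).map
            (fun j => if i = j then [-((Matrix.getD i []).getD j 0), 1]
                      else [-((Matrix.getD i []).getD j 0)])) := by
  intro rows
  induction rows generalizing Matrix with
  | nil =>
    intro i _ hlen
    simp at hlen
    rw [pvAltBuild, List.drop_eq_nil_of_le (by simp [hlen]), List.map_nil]
  | cons row rest ih =>
    intro i hdrop hlen
    have hi : i < Matrix.length := by simp at hlen; omega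
    have h0 : (Matrix.drop i)[0]? = some row := by rw [hdrop]; rfl
    rw [List.getElem?_drop] at h0
    have hgdrow : Matrix.getD i [] = row := by
      rw [List.getD_eq_getElem?_getD]
      simp only [Nat.add_zero] at h0
      rw [h0]; rfl
    have hmem : row ∈ Matrix := by
      have : row ∈ Matrix.drop i := by rw [hdrop]; exact List.mem_cons_self
      exact List.mem_of_mem_drop this
    have hrowlen : Matrix.length ≤ row.length := hpre row hmem
    have hdropr : ((List.range Matrix.length).drop i)
        = i :: (List.range Matrix.length).drop (i + 1) := by
      rw [List.drop_eq_getElem_cons (by simpa)]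
      simp
    rw [pvAltBuild, hdropr, List.map_cons]
    congr 1
    · rw [hgdrow]
      exact altRow_closed row i Matrix.length hi hrowlen
    · apply ih Matrix hpre
      · have : Matrix.drop (i + 1) = (Matrix.drop i).drop 1 := by
          rw [List.drop_drop]
        rw [this, hdrop]; rfl
      · simp at hlen ⊢; omega

-- ===== VERDICT (by name: the statement is the Claim_ definition above) =====
theorem CreateLambdaMatrix_spec : Claim_equal_CreateLambdaMatrix := by
  intro Matrix _ hpre
  unfold Spec_CreateLambdaMatrix CreateLambdaMatrix_alt
  rw [portA_closed, altBuild_closed Matrix hpre Matrix 0 rfl (by simp)]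
  rfl
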